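-- pv_equiv track=rewrite | github.com/kopiro/aoc | 2023/2/main.py | get_max_each_color
-- ===== SOURCE A (Python) =====
-- def get_max_each_color(sets):
--     max_red = 0
--     max_green = 0
--     max_blue = 0
--     for set in sets:
--         red = 0
--         green = 0
--         blue = 0
--         for item in set:
--             if item[1] == "red":
--                 red += item[0]
--             elif item[1] == "green":
--                 green += item[0]
--             elif item[1] == "blue":
--                 blue += item[0]
--         max_red = max(max_red, red)
--         max_green = max(max_green, green)
--         max_blue = max(max_blue, blue)
--     return max_red, max_green, max_blue
-- ===== SOURCE B (Python) =====
-- def get_max_each_color(sets):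
--     def best(color):
--         return max([0] + [sum(q for q, c in s if c == color) for s in sets])
--     return best("red"), best("green"), best("blue")
-- ===== Notes on version B (the rewrite author's own statement) =====
-- stated objective: simpler
-- what changed: Replaces the fused loop with three live accumulators by three independent per-color reductions: for each color, max over 0 and the per-set sums of that color, via a filtered sum per set.
import Mathlib
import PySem

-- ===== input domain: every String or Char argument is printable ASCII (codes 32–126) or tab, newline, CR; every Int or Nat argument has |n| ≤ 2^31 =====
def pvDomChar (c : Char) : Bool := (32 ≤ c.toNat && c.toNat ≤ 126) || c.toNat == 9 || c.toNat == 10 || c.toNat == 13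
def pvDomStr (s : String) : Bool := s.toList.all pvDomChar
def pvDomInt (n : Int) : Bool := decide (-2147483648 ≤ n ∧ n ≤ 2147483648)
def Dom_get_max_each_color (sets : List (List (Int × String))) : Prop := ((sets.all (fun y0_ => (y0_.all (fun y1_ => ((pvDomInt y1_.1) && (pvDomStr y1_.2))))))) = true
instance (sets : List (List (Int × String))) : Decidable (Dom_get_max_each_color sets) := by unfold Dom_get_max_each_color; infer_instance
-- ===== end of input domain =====

-- B rewrites A's single fused pass (three live accumulators) as three independent
-- per-color reductions (max over 0 and the per-set filtered sums); same values, simpler shape.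

-- ===== PORT A =====
-- one fused pass: inner loop accumulates (red, green, blue) per set, outer loop keeps running maxima
def get_max_each_color (sets : List (List (Int × String))) : Int × Int × Int :=
  sets.foldl
    (fun m st =>
      let s := st.foldl
        (fun (a : Int × Int × Int) item =>
          if item.2 == "red" then (a.1 + item.1, a.2.1, a.2.2)
          else if item.2 == "green" then (a.1, a.2.1 + item.1, a.2.2)
          else if item.2 == "blue" then (a.1, a.2.1, a.2.2 + item.1)
          else a)
        (0, 0, 0)
      (max m.1 s.1, max m.2.1 s.2.1, max m.2.2 s.2.2))
    (0, 0, 0)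

-- ===== PORT B =====
-- sum(q for q, c in s if c == color)
def pvSumColor (color : String) (s : List (Int × String)) : Int :=
  s.foldl (fun a it => if it.2 == color then a + it.1 else a) 0

-- best(color) = max([0] + [sum... for s in sets])
def pvBest (sets : List (List (Int × String))) (color : String) : Int :=
  (PySem.List.max? ((0 : Int) :: sets.map (pvSumColor color)) (fun y => y)).getD 0

def get_max_each_color_alt (sets : List (List (Int × String))) : Int × Int × Int :=
  (pvBest sets "red", pvBest sets "green", pvBest sets "blue")

-- ===== PRECONDITION & SPEC =====
def Spec_get_max_each_color (sets : List (List (Int × String))) (out : Int × Int × Int) : Prop := out = get_max_each_color_alt sets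
instance (sets : List (List (Int × String))) (out : Int × Int × Int) : Decidable (Spec_get_max_each_color sets out) := by unfold Spec_get_max_each_color; infer_instance

-- ===== CLAIM (what is proved, stated in full; the proofs are below) =====
def Claim_equal_get_max_each_color : Prop := ∀ (sets : List (List (Int × String))), Dom_get_max_each_color sets → Spec_get_max_each_color sets (get_max_each_color sets)

-- ===== LEMMAS AND PROOFS =====

-- shifting the accumulator of a filtered sum fold
theorem pvFoldSum_shift (f : (Int × String) → Bool) (s : List (Int × String)) (a : Int) :
    s.foldl (fun acc it => if f it then acc + it.1 else acc) a
    = a + s.foldl (fun acc it => if f it then acc + it.1 else acc) 0 := by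
  induction s generalizing a with
  | nil => simp
  | cons x t ih =>
    simp only [List.foldl_cons]
    by_cases h : f x
    · rw [if_pos h, if_pos h, ih (a + x.1), ih (0 + x.1)]; ring
    · rw [if_neg h, if_neg h]; exact ih a

theorem pvSumColor_cons (color : String) (x : Int × String) (t : List (Int × String)) :
    pvSumColor color (x :: t)
    = (if x.2 == color then x.1 else 0) + pvSumColor color t := by
  simp only [pvSumColor, List.foldl_cons]
  by_cases h : x.2 == color
  · rw [if_pos h, if_pos h, pvFoldSum_shift (fun it => it.2 == color) t (0 + x.1)]; ring
  · rw [if_neg h, if_neg h]; ring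

-- the inner fused loop computes the three per-color sums
theorem pvInner_eq (st : List (Int × String)) :
    st.foldl
      (fun (a : Int × Int × Int) item =>
        if item.2 == "red" then (a.1 + item.1, a.2.1, a.2.2)
        else if item.2 == "green" then (a.1, a.2.1 + item.1, a.2.2)
        else if item.2 == "blue" then (a.1, a.2.1, a.2.2 + item.1)
        else a)
      (0, 0, 0)
    = (pvSumColor "red" st, pvSumColor "green" st, pvSumColor "blue" st) := by
  suffices h : ∀ (r g b : Int),
      st.foldl
        (fun (a : Int × Int × Int) item =>
          if item.2 == "red" then (a.1 + item.1, a.2.1, a.2.2)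
          else if item.2 == "green" then (a.1, a.2.1 + item.1, a.2.2)
          else if item.2 == "blue" then (a.1, a.2.1, a.2.2 + item.1)
          else a)
        (r, g, b)
      = (r + pvSumColor "red" st, g + pvSumColor "green" st, b + pvSumColor "blue" st) by
    simpa using h 0 0 0
  induction st with
  | nil => intro r g b; simp [pvSumColor]
  | cons x t ih =>
    intro r g b
    rw [List.foldl_cons, pvSumColor_cons, pvSumColor_cons, pvSumColor_cons]
    by_cases h1 : x.2 = "red"
    · have hb1 : ((x.2 == "red") = true) := by simp [h1]
      have hb2 : ¬((x.2 == "green") = true) := by simp [h1]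
      have hb3 : ¬((x.2 == "blue") = true) := by simp [h1]
      rw [if_pos hb1, if_pos hb1, if_neg hb2, if_neg hb3, ih]
      simp only [Prod.mk.injEq]
      refine ⟨by ring, by ring, by ring⟩
    · have hb1 : ¬((x.2 == "red") = true) := by simp [h1]
      by_cases h2 : x.2 = "green"
      · have hb2 : ((x.2 == "green") = true) := by simp [h2]
        have hb3 : ¬((x.2 == "blue") = true) := by simp [h2]
        rw [if_neg hb1, if_neg hb1, if_pos hb2, if_pos hb2, if_neg hb3, ih]
        simp only [Prod.mk.injEq]
        refine ⟨by ring, by ring, by ring⟩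
      · have hb2 : ¬((x.2 == "green") = true) := by simp [h2]
        by_cases h3 : x.2 = "blue"
        · have hb3 : ((x.2 == "blue") = true) := by simp [h3]
          rw [if_neg hb1, if_neg hb1, if_neg hb2, if_neg hb2, if_pos hb3, if_pos hb3, ih]
          simp only [Prod.mk.injEq]
          refine ⟨by ring, by ring, by ring⟩
        · have hb3 : ¬((x.2 == "blue") = true) := by simp [h3]
          rw [if_neg hb1, if_neg hb1, if_neg hb2, if_neg hb2, if_neg hb3, if_neg hb3, ih]
          simp only [Prod.mk.injEq]
          refine ⟨by ring, by ring, by ring⟩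

-- a fold keeping three running maxima splits into three independent max-folds
theorem pvMax3 {A : Type} (f g h : A → Int) (l : List A) (mr mg mb : Int) :
    l.foldl (fun m x => (max m.1 (f x), max m.2.1 (g x), max m.2.2 (h x))) (mr, mg, mb)
    = ((l.map f).foldl max mr, (l.map g).foldl max mg, (l.map h).foldl max mb) := by
  induction l generalizing mr mg mb with
  | nil => simp
  | cons x t ih =>
    simp only [List.foldl_cons, List.map_cons]
    exact ih _ _ _

theorem pvBest_eq (sets : List (List (Int × String))) (color : String) :
    pvBest sets color = (sets.map (pvSumColor color)).foldl max 0 := by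
  simp [pvBest, PySem.List.max?_id_cons]

-- ===== VERDICT (by name: the statement is the Claim_ definition above) =====
theorem get_max_each_color_spec : Claim_equal_get_max_each_color := by
  intro sets _
  unfold Spec_get_max_each_color get_max_each_color get_max_each_color_alt
  have hfold : sets.foldl
      (fun (m : Int × Int × Int) st =>
        let s := st.foldl
          (fun (a : Int × Int × Int) item =>
            if item.2 == "red" then (a.1 + item.1, a.2.1, a.2.2)
            else if item.2 == "green" then (a.1, a.2.1 + item.1, a.2.2)
            else if item.2 == "blue" then (a.1, a.2.1, a.2.2 + item.1)
            else a)
          (0, 0, 0)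
        (max m.1 s.1, max m.2.1 s.2.1, max m.2.2 s.2.2))
      (0, 0, 0)
    = sets.foldl
      (fun (m : Int × Int × Int) st =>
        (max m.1 (pvSumColor "red" st), max m.2.1 (pvSumColor "green" st),
         max m.2.2 (pvSumColor "blue" st)))
      (0, 0, 0) := by
    apply PySem.List.foldl_congr_mem
    intro acc x _
    simp only [pvInner_eq]
  rw [hfold, pvMax3, pvBest_eq, pvBest_eq, pvBest_eq]
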